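-- pv_equiv track=rewrite | github.com/Cyufei87/LeetCode_Solutions | Algorithms/p_32.py | max_legal_num
-- ===== SOURCE A (Python) =====
-- def max_legal_num(s, letter="("):
--     num = 0
--     tmp = 0
--     for index, i in enumerate(s):
--         if i == letter:
--             tmp += 1
--         else:
--             tmp -= 1
--         if tmp == 0:
--             num = index + 1
--         elif tmp < 0:
--             break
--     return num
-- ===== SOURCE B (Python) =====
-- def max_legal_num(s, letter="("):
--     # Build the table of mapped prefix sums first.
--     cum = []
--     t = 0
--     for c in s:
--         t += 1 if c == letter else -1
--         cum.append(t)
--     # Cut at the first position where the cumulative value goes negative.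
--     cut = len(cum)
--     for i, v in enumerate(cum):
--         if v < 0:
--             cut = i
--             break
--     # Last index in the valid region whose cumulative value is 0.
--     for i, v in reversed(list(enumerate(cum[:cut]))):
--         if v == 0:
--             return i + 1
--     return 0
-- ===== Notes on version B (the rewrite author's own statement) =====
-- stated objective: alternative
-- what changed: Replaced the fused single loop with early break by three separate passes: build the prefix-sum table, find the cut at the first negative value, then scan the region backwards for the last zero (returning immediately).
import Mathlib
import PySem

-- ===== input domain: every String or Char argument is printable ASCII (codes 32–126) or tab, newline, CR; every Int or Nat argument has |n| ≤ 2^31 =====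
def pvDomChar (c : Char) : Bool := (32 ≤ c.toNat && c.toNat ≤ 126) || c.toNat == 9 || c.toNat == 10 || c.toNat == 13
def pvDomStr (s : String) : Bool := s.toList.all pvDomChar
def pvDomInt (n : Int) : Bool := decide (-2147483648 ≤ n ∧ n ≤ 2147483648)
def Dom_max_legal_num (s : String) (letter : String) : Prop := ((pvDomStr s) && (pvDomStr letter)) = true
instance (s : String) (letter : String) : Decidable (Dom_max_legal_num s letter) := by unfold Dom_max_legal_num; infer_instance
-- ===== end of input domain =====

-- B replaces A's fused loop-with-break by three passes (prefix-sum table, cut at first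
-- negative, backward scan for the last zero); objective: alternative decomposition, same cost.

-- ===== PORT A =====
-- the single fused loop of A: state = (index of next char, running tmp, num)
def pvLoopA (letter : String) : List Char → Int → Int → Int → Int
  | [], _, _, num => num
  | c :: rest, index, tmp, num =>
    let tmp' := if String.mk [c] = letter then tmp + 1 else tmp - 1
    if tmp' = 0 then pvLoopA letter rest (index + 1) tmp' (index + 1)
    else if tmp' < 0 then num
    else pvLoopA letter rest (index + 1) tmp' num

def max_legal_num (s : String) (letter : String) : Int :=
  pvLoopA letter s.toList 0 0 0

-- ===== PORT B =====
-- pass 1 of Source B: the list `cum` of mapped prefix sums (appending t after each char)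
def pvCum (letter : String) : List Char → Int → List Int
  | [], _ => []
  | c :: rest, t =>
    let t' := t + (if String.mk [c] = letter then 1 else -1)
    t' :: pvCum letter rest t'

-- pass 2 of Source B: index of the first negative value (len cum if none)
def pvCut : List Int → Nat
  | [] => 0
  | v :: rest => if v < 0 then 0 else 1 + pvCut rest

-- pass 3 of Source B: scan `reversed(list(enumerate(region)))`, return i+1 at the first zero, else 0
def pvLastZero : List (Int × Int) → Int
  | [] => 0
  | (i, v) :: rest => if v = 0 then i + 1 else pvLastZero rest

def max_legal_num_alt (s : String) (letter : String) : Int :=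
  let cum := pvCum letter s.toList 0
  let cut := pvCut cum
  pvLastZero ((PySem.List.enumerate (cum.take cut)).reverse)

-- ===== PRECONDITION & SPEC =====
def Spec_max_legal_num (s : String) (letter : String) (out : Int) : Prop := out = max_legal_num_alt s letter
instance (s : String) (letter : String) (out : Int) : Decidable (Spec_max_legal_num s letter out) := by unfold Spec_max_legal_num; infer_instance

-- ===== CLAIM (what is proved, stated in full; the proofs are below) =====
def Claim_equal_max_legal_num : Prop := ∀ (s : String) (letter : String), Dom_max_legal_num s letter → Spec_max_legal_num s letter (max_legal_num s letter)

-- ===== LEMMAS AND PROOFS =====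

-- A's loop, expressed over the list of prefix sums instead of the characters
def pvG : List Int → Int → Int → Int
  | [], _, num => num
  | v :: rest, idx, num =>
    if v = 0 then pvG rest (idx + 1) (idx + 1)
    else if v < 0 then num
    else pvG rest (idx + 1) num

theorem pvLoopA_eq_pvG (letter : String) (l : List Char) :
    ∀ (t idx num : Int), pvLoopA letter l idx t num = pvG (pvCum letter l t) idx num := by
  induction l with
  | nil => intro t idx num; rfl
  | cons c rest ih =>
    intro t idx num
    simp only [pvLoopA, pvCum, pvG]
    by_cases h : String.mk [c] = letter <;> simp [h, ih] <;> ring_nf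

theorem pvLastZero_append (l : List (Int × Int)) (i v : Int)
    (hpos : ∀ p ∈ l, 0 ≤ p.1) :
    pvLastZero (l ++ [(i, v)]) =
      if pvLastZero l = 0 then (if v = 0 then i + 1 else 0) else pvLastZero l := by
  induction l with
  | nil => simp [pvLastZero]
  | cons p rest ih =>
    obtain ⟨j, w⟩ := p
    have hj : (0 : Int) ≤ j := hpos (j, w) (List.mem_cons_self ..)
    by_cases hw : w = 0
    · simp [pvLastZero, hw]
      omega
    · simpa [pvLastZero, hw] using ih (fun p hp => hpos p (List.mem_cons_of_mem _ hp))

theorem pvEnum_fst_nonneg (l : List Int) (k : Int) (hk : 0 ≤ k) :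
    ∀ p ∈ (PySem.List.enumerate l k).reverse, 0 ≤ p.1 := by
  intro p hp
  rw [List.mem_reverse] at hp
  rw [PySem.List.mem_enumerate_iff] at hp
  obtain ⟨j, hj, rfl⟩ := hp
  simp; omega

theorem pvG_eq (cum : List Int) :
    ∀ (idx num : Int), 0 ≤ idx →
      pvG cum idx num =
        (if pvLastZero ((PySem.List.enumerate (cum.take (pvCut cum)) idx).reverse) = 0 then num
         else pvLastZero ((PySem.List.enumerate (cum.take (pvCut cum)) idx).reverse)) := by
  induction cum with
  | nil => intro idx num _; simp [pvG, pvCut, PySem.List.enumerate, pvLastZero]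
  | cons v rest ih =>
    intro idx num hidx
    by_cases hneg : v < 0
    · have hv : ¬ v = 0 := by omega
      simp [pvG, pvCut, hneg, hv, pvLastZero]
    · have hcut : pvCut (v :: rest) = 1 + pvCut rest := by simp [pvCut, hneg]
      have henum : (PySem.List.enumerate ((v :: rest).take (pvCut (v :: rest))) idx).reverse
          = (PySem.List.enumerate (rest.take (pvCut rest)) (idx + 1)).reverse ++ [(idx, v)] := by
        rw [hcut, Nat.add_comm, List.take_succ_cons, PySem.List.enumerate_cons, List.reverse_cons]
      have happ := pvLastZero_append
        ((PySem.List.enumerate (rest.take (pvCut rest)) (idx + 1)).reverse) idx v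
        (pvEnum_fst_nonneg _ _ (by omega))
      rw [henum, happ]
      by_cases hv : v = 0
      · have hG : pvG (v :: rest) idx num = pvG rest (idx + 1) (idx + 1) := by simp [pvG, hv]
        rw [hG, ih (idx + 1) (idx + 1) (by omega)]
        by_cases hrt0 : pvLastZero ((PySem.List.enumerate (rest.take (pvCut rest)) (idx + 1)).reverse) = 0 <;>
          simp [hrt0, hv] <;> omega
      · have hG : pvG (v :: rest) idx num = pvG rest (idx + 1) num := by simp [pvG, hv, hneg]
        rw [hG, ih (idx + 1) num (by omega)]
        by_cases hrt0 : pvLastZero ((PySem.List.enumerate (rest.take (pvCut rest)) (idx + 1)).reverse) = 0 <;>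
          simp [hrt0, hv]

-- ===== VERDICT (by name: the statement is the Claim_ definition above) =====
theorem max_legal_num_spec : Claim_equal_max_legal_num := by
  intro s letter _
  unfold Spec_max_legal_num max_legal_num max_legal_num_alt
  rw [pvLoopA_eq_pvG, pvG_eq _ 0 0 (le_refl 0)]
  split <;> simp_all
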